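-- pv_equiv track=rewrite | github.com/aboveyunhai/topNword | dataprocessing/data_sorting/wordco_c.py | wordcc
-- ===== SOURCE A (Python) =====
-- def wordcc(article, list_tt):
--     artF = article.split()
--     list_wcc = []
--     for item in list_tt:
--         indexes = [i for i, s in enumerate(artF) if item == s]
--         for index in indexes:
--             s_tmp_l = item + "+" + artF[index - 1]
--             list_wcc.append(s_tmp_l)
--             if index != len(artF)-1:
--                 s_tmp_r = item + "+" + artF[index + 1]
--                 list_wcc.append(s_tmp_r)
--     return list_wcc
-- ===== SOURCE B (Python) =====
-- def wordcc(article, list_tt):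
--     artF = article.split()
--     last = len(artF) - 1
--     table = {}
--     for i, w in enumerate(artF):
--         # artF[i - 1] at i == 0 is Python negative indexing (last word), same as A
--         table.setdefault(w, []).append(w + "+" + artF[i - 1])
--         if i != last:
--             table.setdefault(w, []).append(w + "+" + artF[i + 1])
--     out = []
--     for item in list_tt:
--         out.extend(table.get(item, []))
--     return out
-- ===== Notes on version B (the rewrite author's own statement) =====
-- stated objective: faster
-- what changed: Replaced the per-target rescans of the article (a nested index-collect-then-loop pass for each target word) by a single pass over the article that groups neighbor-pair strings into a dict keyed by word, followed by plain lookups per target.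
import Mathlib
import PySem

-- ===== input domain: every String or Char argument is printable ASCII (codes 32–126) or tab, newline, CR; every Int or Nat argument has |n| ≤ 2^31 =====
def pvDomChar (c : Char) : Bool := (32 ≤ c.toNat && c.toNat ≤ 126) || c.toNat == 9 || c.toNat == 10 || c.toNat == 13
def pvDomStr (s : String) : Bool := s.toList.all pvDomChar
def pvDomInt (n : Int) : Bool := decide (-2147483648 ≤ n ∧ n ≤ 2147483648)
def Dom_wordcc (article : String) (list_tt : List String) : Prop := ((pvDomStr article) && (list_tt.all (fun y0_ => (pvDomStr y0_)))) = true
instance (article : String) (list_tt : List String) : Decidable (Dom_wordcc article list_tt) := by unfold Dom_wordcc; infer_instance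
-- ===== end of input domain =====

-- B replaces A's per-target rescans of the article by one grouping pass into a dict plus lookups (faster in a timing run).

-- ===== PORT A =====
-- artF[index - 1] / artF[index + 1] are ported with pyGetD "": every index produced by the
-- comprehension is in range (and index-1 = -1 is Python's valid negative index), so the
-- default is never taken and the port is exact.
def wordcc (article : String) (list_tt : List String) : List String :=
  let artF := PySem.Str.split₀ article
  list_tt.foldl (fun list_wcc item =>
    let indexes := ((PySem.List.enumerate artF).filter (fun p => item == p.2)).map (·.1)
    indexes.foldl (fun acc index =>
      let s_tmp_l := item ++ "+" ++ PySem.List.pyGetD artF (index - 1) ""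
      let acc := acc ++ [s_tmp_l]
      if index ≠ (artF.length : Int) - 1 then
        acc ++ [item ++ "+" ++ PySem.List.pyGetD artF (index + 1) ""]
      else acc) list_wcc) []

-- ===== PORT B =====
-- table.setdefault(w, []).append(s) is ported as Dict.modify w [] (· ++ [s]); dict.get with
-- default [] is Dict.getD; both are exact.
def wordcc_alt (article : String) (list_tt : List String) : List String :=
  let artF := PySem.Str.split₀ article
  let last : Int := (artF.length : Int) - 1
  let table := (PySem.List.enumerate artF).foldl (fun d p =>
      let d := d.modify p.2 [] (· ++ [p.2 ++ "+" ++ PySem.List.pyGetD artF (p.1 - 1) ""])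
      if p.1 ≠ last then
        d.modify p.2 [] (· ++ [p.2 ++ "+" ++ PySem.List.pyGetD artF (p.1 + 1) ""])
      else d) PySem.Dict.empty
  list_tt.foldl (fun out item => out ++ table.getD item []) []

-- ===== PRECONDITION & SPEC =====
def Spec_wordcc (article : String) (list_tt : List String) (out : List String) : Prop := out = wordcc_alt article list_tt
instance (article : String) (list_tt : List String) (out : List String) : Decidable (Spec_wordcc article list_tt out) := by unfold Spec_wordcc; infer_instance

-- ===== CLAIM (what is proved, stated in full; the proofs are below) =====
def Claim_equal_wordcc : Prop := ∀ (article : String) (list_tt : List String), Dom_wordcc article list_tt → Spec_wordcc article list_tt (wordcc article list_tt)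

-- ===== LEMMAS AND PROOFS =====

-- the neighbor-pair strings emitted for one occurrence of `item` at position i
def strsOf (artF : List String) (item : String) (i : Int) : List String :=
  (item ++ "+" ++ PySem.List.pyGetD artF (i - 1) "") ::
  (if i ≠ (artF.length : Int) - 1 then [item ++ "+" ++ PySem.List.pyGetD artF (i + 1) ""] else [])

-- the (key, string) pairs B's table pass appends for one enumerate entry
def pairsOf (artF : List String) (p : Int × String) : List (String × String) :=
  (strsOf artF p.2 p.1).map (fun s => (p.2, s))

-- B's table pass is the one-modify-per-pair fold over the flattened pair list
theorem foldlB_eq_flatMap (artF : List String) (l : List (Int × String))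
    (d : PySem.Dict String (List String)) :
    l.foldl (fun d p =>
      let d := d.modify p.2 [] (· ++ [p.2 ++ "+" ++ PySem.List.pyGetD artF (p.1 - 1) ""])
      if p.1 ≠ (artF.length : Int) - 1 then
        d.modify p.2 [] (· ++ [p.2 ++ "+" ++ PySem.List.pyGetD artF (p.1 + 1) ""])
      else d) d
    = (l.flatMap (pairsOf artF)).foldl (fun d q => d.modify q.1 [] (· ++ [q.2])) d := by
  induction l generalizing d with
  | nil => rfl
  | cons p l ih =>
      simp only [List.foldl_cons, List.flatMap_cons, List.foldl_append, ih]
      congr 1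
      by_cases h : p.1 ≠ (artF.length : Int) - 1 <;>
        simp [pairsOf, strsOf, h]

-- per enumerate entry: what survives the key filter
theorem filter_pairsOf (artF : List String) (item : String) (p : Int × String) :
    ((pairsOf artF p).filter (fun q => q.1 == item)).map (·.2)
      = if item == p.2 then strsOf artF item p.1 else [] := by
  by_cases h : p.2 = item
  · subst h
    by_cases hi : p.1 ≠ (artF.length : Int) - 1 <;> simp [pairsOf, strsOf, hi]
  · have h' : ¬ (item = p.2) := fun e => h e.symm
    by_cases hi : p.1 ≠ (artF.length : Int) - 1 <;> simp [pairsOf, strsOf, hi, h, h']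

-- the grouped strings for `item` equal A's index scan flattened through strsOf
theorem grouped_eq_scan (artF : List String) (item : String) (l : List (Int × String)) :
    ((l.flatMap (pairsOf artF)).filter (fun q => q.1 == item)).map (·.2)
      = ((l.filter (fun p => item == p.2)).map (·.1)).flatMap (strsOf artF item) := by
  induction l with
  | nil => rfl
  | cons p l ih =>
      simp only [List.flatMap_cons, List.filter_append, List.map_append, ih,
        List.filter_cons]
      rw [filter_pairsOf]
      by_cases h : item == p.2
      · simp [h]
      · simp [h]

-- A's inner loop appends exactly strsOf per index
theorem foldlA_inner (artF : List String) (item : String) (idxs : List Int)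
    (acc : List String) :
    idxs.foldl (fun acc index =>
      let s_tmp_l := item ++ "+" ++ PySem.List.pyGetD artF (index - 1) ""
      let acc := acc ++ [s_tmp_l]
      if index ≠ (artF.length : Int) - 1 then
        acc ++ [item ++ "+" ++ PySem.List.pyGetD artF (index + 1) ""]
      else acc) acc
    = acc ++ idxs.flatMap (strsOf artF item) := by
  have hbody : (fun (acc : List String) (index : Int) =>
      let s_tmp_l := item ++ "+" ++ PySem.List.pyGetD artF (index - 1) ""
      let acc := acc ++ [s_tmp_l]
      if index ≠ (artF.length : Int) - 1 then
        acc ++ [item ++ "+" ++ PySem.List.pyGetD artF (index + 1) ""]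
      else acc)
      = (fun acc index => acc ++ strsOf artF item index) := by
    funext acc index
    by_cases h : index ≠ (artF.length : Int) - 1 <;> simp [strsOf, h]
  rw [hbody, PySem.List.foldl_append_eq_flatMap]

-- ===== VERDICT (by name: the statement is the Claim_ definition above) =====
theorem wordcc_spec : Claim_equal_wordcc := by
  intro article list_tt _
  unfold Spec_wordcc wordcc wordcc_alt
  simp only
  rw [foldlB_eq_flatMap]
  apply PySem.List.foldl_congr_mem
  intro acc item _
  rw [foldlA_inner, PySem.Dict.getD_foldl_modify_append, PySem.Dict.getD_empty,
    List.nil_append, grouped_eq_scan]
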